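-- pv_equiv track=rewrite | github.com/ssafy6-nathan/algorithm-study | 22.04.19/EJH/17829.py | polling
-- ===== SOURCE A (Python) =====
-- def polling(arr, N):
--     if len(arr) == 1:
--         return arr[0][0]
--     n_arr = []
--     for i in range(N // 2):
--         nr_arr = []
--         for j in range(N // 2):
--             nc_arr = [arr[i * 2][j * 2], arr[i * 2 + 1][j * 2], arr[i * 2][j * 2 + 1], arr[i * 2 + 1][j * 2 + 1]]
--
--             nc_arr.sort()
--
--             nr_arr.append(nc_arr[2])
--         n_arr.append(nr_arr)
--     return polling(n_arr, N // 2)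
-- ===== SOURCE B (Python) =====
-- def polling(arr, N):
--     current, size = arr, N
--     while len(current) > 1:
--         half = size // 2
--         current = [
--             [sorted([current[i * 2][j * 2], current[i * 2 + 1][j * 2],
--                      current[i * 2][j * 2 + 1], current[i * 2 + 1][j * 2 + 1]])[2]
--              for j in range(half)]
--             for i in range(half)]
--         size = half
--     return current[0][0]
-- ===== Notes on version B (the rewrite author's own statement) =====
-- stated objective: idiomatic
-- what changed: Replaced the recursive reduction and explicit append-accumulator loops by an iterative while-loop that rebuilds the half-size grid with nested list comprehensions until one cell remains.
import Mathlib
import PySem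

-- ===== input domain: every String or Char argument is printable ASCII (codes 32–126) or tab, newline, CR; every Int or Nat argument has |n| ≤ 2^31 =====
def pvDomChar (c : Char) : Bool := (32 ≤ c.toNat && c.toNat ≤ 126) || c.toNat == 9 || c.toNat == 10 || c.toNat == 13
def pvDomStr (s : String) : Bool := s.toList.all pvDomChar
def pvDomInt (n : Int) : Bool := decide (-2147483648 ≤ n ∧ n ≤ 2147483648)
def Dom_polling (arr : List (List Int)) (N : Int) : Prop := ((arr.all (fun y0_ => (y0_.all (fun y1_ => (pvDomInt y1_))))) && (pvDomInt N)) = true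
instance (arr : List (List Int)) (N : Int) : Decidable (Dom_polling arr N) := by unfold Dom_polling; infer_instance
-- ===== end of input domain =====

-- B replaces A's recursion with explicit append-accumulator loops by an iterative
-- while-loop rebuilding the half-size grid with nested list comprehensions (idiomatic).


-- ===== PORT A =====
-- fuel makes the Python recursion (which does not structurally terminate for
-- malformed N) a total Lean function; Pre_ guarantees the seeded fuel suffices.
def pollingGoA (fuel : Nat) (arr : List (List Int)) (N : Int) : Int :=
  match fuel with
  | 0 => 0
  | fuel + 1 =>
    if arr.length = 1 then
      PySem.List.pyGetD (PySem.List.pyGetD arr 0 []) 0 0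
    else
      let n_arr :=
        (PySem.List.pyRange 0 (PySem.Int.floordiv N 2) 1).foldl (fun n_arr i =>
          let nr_arr :=
            (PySem.List.pyRange 0 (PySem.Int.floordiv N 2) 1).foldl (fun nr_arr j =>
              let nc_arr := [PySem.List.pyGetD (PySem.List.pyGetD arr (i * 2) []) (j * 2) 0,
                             PySem.List.pyGetD (PySem.List.pyGetD arr (i * 2 + 1) []) (j * 2) 0,
                             PySem.List.pyGetD (PySem.List.pyGetD arr (i * 2) []) (j * 2 + 1) 0,
                             PySem.List.pyGetD (PySem.List.pyGetD arr (i * 2 + 1) []) (j * 2 + 1) 0]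
              let nc_arr := PySem.List.sorted nc_arr (fun x => x) false
              nr_arr ++ [PySem.List.pyGetD nc_arr 2 0]) []
          n_arr ++ [nr_arr]) []
      pollingGoA fuel n_arr (PySem.Int.floordiv N 2)

def polling (arr : List (List Int)) (N : Int) : Int := pollingGoA (N.toNat + 1) arr N

-- ===== PORT B =====
def pollingStepB (current : List (List Int)) (half : Int) : List (List Int) :=
  (PySem.List.pyRange 0 half 1).map (fun i =>
    (PySem.List.pyRange 0 half 1).map (fun j =>
      PySem.List.pyGetD
        (PySem.List.sorted [PySem.List.pyGetD (PySem.List.pyGetD current (i * 2) []) (j * 2) 0,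
                            PySem.List.pyGetD (PySem.List.pyGetD current (i * 2 + 1) []) (j * 2) 0,
                            PySem.List.pyGetD (PySem.List.pyGetD current (i * 2) []) (j * 2 + 1) 0,
                            PySem.List.pyGetD (PySem.List.pyGetD current (i * 2 + 1) []) (j * 2 + 1) 0]
          (fun x => x) false) 2 0))

def pollingLoopB (fuel : Nat) (current : List (List Int)) (size : Int) : Int :=
  match fuel with
  | 0 => 0
  | fuel + 1 =>
    if 1 < current.length then
      let half := PySem.Int.floordiv size 2
      pollingLoopB fuel (pollingStepB current half) half
    else
      PySem.List.pyGetD (PySem.List.pyGetD current 0 []) 0 0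

def polling_alt (arr : List (List Int)) (N : Int) : Int := pollingLoopB (N.toNat + 1) arr N

-- ===== PRECONDITION & SPEC =====
-- Pre_ is exactly where Python A returns: either a single nonempty row, or N ≥ 2 with
-- the first 2*(N//2) rows present and each at least 2*(N//2) long (the cells A reads);
-- elsewhere A raises (IndexError, or RecursionError from infinite recursion).
def Pre_polling (arr : List (List Int)) (N : Int) : Prop :=
  (arr.length = 1 ∧ 0 < (arr.headD []).length) ∨
  (2 ≤ N ∧ 2 * (N / 2) ≤ (arr.length : Int) ∧
    ∀ r ∈ arr.take (2 * (N / 2)).toNat, 2 * (N / 2) ≤ (r.length : Int))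
instance (arr : List (List Int)) (N : Int) : Decidable (Pre_polling arr N) := by
  unfold Pre_polling; infer_instance

def pvWitness_polling : List (List Int) × Int := ([[1, 2], [3, 4]], 2)

def Spec_polling (arr : List (List Int)) (N : Int) (out : Int) : Prop := out = polling_alt arr N
instance (arr : List (List Int)) (N : Int) (out : Int) : Decidable (Spec_polling arr N out) := by unfold Spec_polling; infer_instance

-- ===== CLAIM (what is proved, stated in full; the proofs are below) =====
def Claim_equal_polling : Prop := ∀ (arr : List (List Int)) (N : Int), Dom_polling arr N → Pre_polling arr N → Spec_polling arr N (polling arr N)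

-- ===== LEMMAS AND PROOFS =====

-- A's double append-accumulator build equals B's nested map build.
lemma build_eq_step (arr : List (List Int)) (half : Int) :
    ((PySem.List.pyRange 0 half 1).foldl (fun n_arr i =>
        n_arr ++ [(PySem.List.pyRange 0 half 1).foldl (fun nr_arr j =>
          nr_arr ++ [PySem.List.pyGetD
            (PySem.List.sorted [PySem.List.pyGetD (PySem.List.pyGetD arr (i * 2) []) (j * 2) 0,
                                PySem.List.pyGetD (PySem.List.pyGetD arr (i * 2 + 1) []) (j * 2) 0,
                                PySem.List.pyGetD (PySem.List.pyGetD arr (i * 2) []) (j * 2 + 1) 0,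
                                PySem.List.pyGetD (PySem.List.pyGetD arr (i * 2 + 1) []) (j * 2 + 1) 0]
              (fun x => x) false) 2 0]) []]) [])
      = pollingStepB arr half := by
  simp only [pollingStepB, PySem.List.foldl_append_singleton_eq_map, List.nil_append]

lemma loop_eq (fuel : Nat) : ∀ (arr : List (List Int)) (N : Int),
    Pre_polling arr N → N.toNat + 1 ≤ fuel →
    pollingGoA fuel arr N = pollingLoopB fuel arr N := by
  induction fuel with
  | zero => intro arr N _ h; omega
  | succ fuel ih =>
    intro arr N hpre hfuel
    by_cases hlen : arr.length = 1
    · simp [pollingGoA, pollingLoopB, hlen]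
    · rcases hpre with ⟨h1, _⟩ | ⟨hN, hrows, hcols⟩
      · exact absurd h1 hlen
      have hfd : PySem.Int.floordiv N 2 = N / 2 :=
        PySem.Int.floordiv_eq_ediv_of_pos (by omega)
      have hgt : 1 < arr.length := by omega
      have hhalf : 1 ≤ N / 2 := by omega
      have hsteplen : (pollingStepB arr (N / 2)).length = (N / 2).toNat := by
        simp [pollingStepB, PySem.List.length_pyRange_one]
      have hsteprow : ∀ r ∈ pollingStepB arr (N / 2), r.length = (N / 2).toNat := by
        intro r hr
        simp only [pollingStepB, List.mem_map] at hr
        obtain ⟨i, _, rfl⟩ := hr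
        simp [PySem.List.length_pyRange_one]
      have hpre' : Pre_polling (pollingStepB arr (N / 2)) (N / 2) := by
        by_cases h1 : N / 2 = 1
        · left
          have hlen1 : (pollingStepB arr (N / 2)).length = 1 := by omega
          obtain ⟨r, hG⟩ := List.length_eq_one_iff.mp hlen1
          have hrlen := hsteprow r (by rw [hG]; exact List.mem_singleton.mpr rfl)
          rw [hG]
          refine ⟨rfl, ?_⟩
          simp only [List.headD_cons]
          omega
        · right
          refine ⟨by omega, by rw [hsteplen]; omega, ?_⟩
          intro r hr
          rw [hsteprow r (List.mem_of_mem_take hr)]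
          omega
      have hfuel' : (N / 2).toNat + 1 ≤ fuel := by omega
      calc pollingGoA (fuel + 1) arr N
          = pollingGoA fuel (pollingStepB arr (N / 2)) (N / 2) := by
            rw [pollingGoA]
            rw [if_neg hlen, hfd, build_eq_step]
        _ = pollingLoopB fuel (pollingStepB arr (N / 2)) (N / 2) :=
            ih _ _ hpre' hfuel'
        _ = pollingLoopB (fuel + 1) arr N := by
            rw [pollingLoopB, if_pos hgt, hfd]

-- ===== VERDICT (by name: the statement is the Claim_ definition above) =====
theorem polling_spec : Claim_equal_polling := by
  intro arr N _ hpre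
  unfold Spec_polling polling polling_alt
  exact loop_eq (N.toNat + 1) arr N hpre le_rfl
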